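-- pv_equiv track=rewrite | github.com/mileoa/28tasks | Keymaker/Keymaker.py | Keymaker
-- ===== SOURCE A (Python) =====
-- CLOSED_DOOR_SIGN = "0"
--
-- OPENED_DOOR_SIGN = "1"
--
-- def Keymaker(k: int) -> str:
--     """Return result of simulation of a key master`s work"""
--     doors_status_after_simulation: list[str] = [
--         CLOSED_DOOR_SIGN for i in range(k)
--     ]  # All doors are closed.
--
--     # Change status of door.
--     # k == 1 then change all doors.
--     # k == 2 then change every second door.
--     # k == 3 then change evety third second door and so on
--     for i in range(k):
--         for j in range(i, k, i + 1):
--             if doors_status_after_simulation[j] == OPENED_DOOR_SIGN: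
--                 doors_status_after_simulation[j] = CLOSED_DOOR_SIGN
--                 continue
--             doors_status_after_simulation[j] = OPENED_DOOR_SIGN
--
--     return "".join(doors_status_after_simulation)
-- ===== SOURCE B (Python) =====
-- CLOSED_DOOR_SIGN = "0"
--
-- OPENED_DOOR_SIGN = "1"
--
--
-- def Keymaker(k: int) -> str:
--     """Return result of simulation of a key master`s work.
--
--     Door j (0-based) ends open iff j+1 has an odd number of divisors,
--     i.e. iff j+1 is a perfect square; one pass emitting the next square.
--     """
--     out = []
--     d = 1
--     for j in range(k):
--         if j + 1 == d * d:
--             out.append(OPENED_DOOR_SIGN)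
--             d += 1
--         else:
--             out.append(CLOSED_DOOR_SIGN)
--     return "".join(out)
-- ===== Notes on version B (the rewrite author's own statement) =====
-- stated objective: faster
-- what changed: Replaces the O(k log k) door-toggling simulation (one toggle pass per step size) by a single O(k) pass that emits '1' exactly at the perfect-square positions, tracking the next square with a counter.
import Mathlib
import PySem

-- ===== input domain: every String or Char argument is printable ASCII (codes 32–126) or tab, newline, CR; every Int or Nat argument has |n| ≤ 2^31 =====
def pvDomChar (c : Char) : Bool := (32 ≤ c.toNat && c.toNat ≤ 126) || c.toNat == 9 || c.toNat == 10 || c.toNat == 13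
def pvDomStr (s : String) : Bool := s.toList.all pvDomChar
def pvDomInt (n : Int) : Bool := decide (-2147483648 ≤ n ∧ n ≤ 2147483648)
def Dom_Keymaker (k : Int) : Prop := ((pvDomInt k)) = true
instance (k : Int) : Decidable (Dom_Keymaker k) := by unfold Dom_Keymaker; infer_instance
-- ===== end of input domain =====

-- B replaces A's O(k log k) door-toggling simulation by a single pass that emits "1"
-- exactly at the perfect-square positions (objective: faster, asymptotic).

-- ===== PORT A =====
def Keymaker (k : Int) : String :=
  let doors0 : List String := (PySem.List.pyRange 0 k 1).map (fun _ => "0")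
  let final : List String :=
    (PySem.List.pyRange 0 k 1).foldl (fun doors i =>
      (PySem.List.pyRange i k (i + 1)).foldl (fun ds j =>
        if PySem.List.pyGetD ds j "" = "1" then PySem.List.pySetD ds j "0"
        else PySem.List.pySetD ds j "1") doors) doors0
  PySem.Str.join "" final

-- ===== PORT B =====
def Keymaker_alt (k : Int) : String :=
  let st : List String × Int :=
    (PySem.List.pyRange 0 k 1).foldl
      (fun (st : List String × Int) j =>
        if j + 1 = st.2 * st.2 then (st.1 ++ ["1"], st.2 + 1) else (st.1 ++ ["0"], st.2))
      ([], 1)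
  PySem.Str.join "" st.1

-- ===== PRECONDITION & SPEC =====
def Spec_Keymaker (k : Int) (out : String) : Prop := out = Keymaker_alt k
instance (k : Int) (out : String) : Decidable (Spec_Keymaker k out) := by unfold Spec_Keymaker; infer_instance

-- ===== CLAIM (what is proved, stated in full; the proofs are below) =====
def Claim_equal_Keymaker : Prop := ∀ (k : Int), Dom_Keymaker k → Spec_Keymaker k (Keymaker k)

-- ===== LEMMAS AND PROOFS =====

def pvSgn (c : Nat) : String := if c % 2 = 1 then "1" else "0"
def pvTog (ds : List String) (j : Nat) : List String :=
  if ds.getD j "" = "1" then ds.set j "0" else ds.set j "1"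
lemma pvSet_map_range {β : Type} (f : Nat → β) (n j : Nat) (v : β) :
    ((List.range n).map f).set j v
      = (List.range n).map (fun p => if p = j then v else f p) := by
  apply List.ext_getElem
  · simp
  · intro p hp hp'
    simp only [List.getElem_set, List.getElem_map, List.getElem_range]
    split_ifs with h1 h2 h2 <;> first | rfl | omega

lemma pvTog_fold (L : List Nat) : ∀ (c : Nat → Nat) {n : Nat}, (∀ j ∈ L, j < n) →
    L.foldl pvTog ((List.range n).map (fun p => pvSgn (c p)))
      = (List.range n).map (fun p => pvSgn (c p + L.count p)) := by
  induction L with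
  | nil => intro c n _; simp
  | cons j L ih =>
    intro c n hL
    have hj : j < n := hL j (by simp)
    have hstep : pvTog ((List.range n).map (fun p => pvSgn (c p))) j
        = (List.range n).map (fun p => pvSgn (c p + if p = j then 1 else 0)) := by
      unfold pvTog
      rw [PySem.List.getD_map_range _ _ _ _ hj]
      by_cases h1 : c j % 2 = 1
      · rw [if_pos (by simp [pvSgn, h1]), pvSet_map_range]
        apply List.map_congr_left; intro p hp
        by_cases hpj : p = j
        · subst hpj
          simp [pvSgn]
          omega
        · simp [hpj]
      · rw [if_neg (by simp [pvSgn, h1]), pvSet_map_range]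
        apply List.map_congr_left; intro p hp
        by_cases hpj : p = j
        · subst hpj
          simp [pvSgn]
          omega
        · simp [hpj]
    rw [List.foldl_cons, hstep, ih (fun p => c p + if p = j then 1 else 0)
      (fun x hx => hL x (by simp [hx]))]
    apply List.map_congr_left
    intro p hp
    rw [List.count_cons]
    congr 1
    by_cases hpj : p = j <;> simp [hpj] <;> omega

def pvInner (i n : Nat) : List Nat :=
  (List.range (n / (i + 1))).map (fun t => i + (i + 1) * t)

lemma pvMem_inner_lt {i n j : Nat} (hj : j ∈ pvInner i n) : j < n := by
  unfold pvInner at hj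
  obtain ⟨t, ht, rfl⟩ := List.mem_map.1 hj
  rw [List.mem_range] at ht
  have h1 : t + 1 ≤ n / (i + 1) := ht
  have h2 : (t + 1) * (i + 1) ≤ n := (Nat.le_div_iff_mul_le (by omega)).1 h1
  nlinarith

lemma pvOuter_fold (I : List Nat) : ∀ (c : Nat → Nat) {n : Nat},
    I.foldl (fun ds i => (pvInner i n).foldl pvTog ds)
        ((List.range n).map (fun p => pvSgn (c p)))
      = (List.range n).map
          (fun p => pvSgn (c p + (I.map (fun i => (pvInner i n).count p)).sum)) := by
  induction I with
  | nil => intro c n; simp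
  | cons i I ih =>
    intro c n
    rw [List.foldl_cons,
      pvTog_fold (pvInner i n) c (fun j hj => pvMem_inner_lt hj),
      ih (fun p => c p + (pvInner i n).count p)]
    apply List.map_congr_left
    intro p hp
    simp [Nat.add_assoc]

lemma pvCount_inner (i n p : Nat) (hp : p < n) :
    (pvInner i n).count p = if (i + 1) ∣ (p + 1) then 1 else 0 := by
  unfold pvInner
  by_cases hd : (i + 1) ∣ (p + 1)
  · rw [if_pos hd]
    obtain ⟨q, hq⟩ := hd
    have hq1 : 1 ≤ q := by nlinarith
    have hmem : p ∈ (List.range (n / (i + 1))).map (fun t => i + (i + 1) * t) := by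
      refine List.mem_map.2 ⟨q - 1, List.mem_range.2 ?_, ?_⟩
      · have h3 : q * (i + 1) ≤ n := by nlinarith
        have h4 := (Nat.le_div_iff_mul_le (k := i + 1) (by omega)).2 h3
        omega
      · nlinarith [Nat.sub_add_cancel hq1]
    refine List.count_eq_one_of_mem (List.Nodup.map ?_ (List.nodup_range)) hmem
    intro a b hab
    simp only at hab
    have h5 : (i + 1) * a = (i + 1) * b := by omega
    exact Nat.eq_of_mul_eq_mul_left (by omega) h5
  · rw [if_neg hd]
    apply List.count_eq_zero_of_not_mem
    intro hmem
    obtain ⟨t, _, hteq⟩ := List.mem_map.1 hmem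
    refine hd ⟨t + 1, ?_⟩
    have hr : (i + 1) * (t + 1) = (i + 1) * t + (i + 1) := by ring
    omega

lemma pvEven_card_invol (f : Nat → Nat) (s : Finset Nat)
    (hmem : ∀ a ∈ s, f a ∈ s) (hinv : ∀ a ∈ s, f (f a) = a) (hne : ∀ a ∈ s, f a ≠ a) :
    Even s.card := by
  induction s using Finset.strongInductionOn with
  | _ s ih =>
    rcases s.eq_empty_or_nonempty with rfl | ⟨a, ha⟩
    · simp
    · have hfa : f a ∈ s := hmem a ha
      have hfaa : f a ≠ a := hne a ha
      have hfa' : f a ∈ s.erase a := Finset.mem_erase.2 ⟨hfaa, hfa⟩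
      have hsub : (s.erase a).erase (f a) ⊂ s :=
        ssubset_of_subset_of_ssubset (Finset.erase_subset _ _) (Finset.erase_ssubset ha)
      have hmem' : ∀ b ∈ (s.erase a).erase (f a), b ∈ s ∧ b ≠ a ∧ b ≠ f a := by
        intro b hb
        rw [Finset.mem_erase, Finset.mem_erase] at hb
        exact ⟨hb.2.2, hb.2.1, hb.1⟩
      have heven : Even ((s.erase a).erase (f a)).card := by
        refine ih _ hsub ?_ ?_ ?_
        · intro b hb
          obtain ⟨hbs, hba, hbfa⟩ := hmem' b hb
          rw [Finset.mem_erase, Finset.mem_erase]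
          refine ⟨?_, ?_, hmem b hbs⟩
          · intro h
            exact hba (by rw [← hinv b hbs, h, hinv a ha])
          · intro h
            exact hbfa (by rw [← hinv b hbs, h])
        · intro b hb; exact hinv b (hmem' b hb).1
        · intro b hb; exact hne b (hmem' b hb).1
      have hc1 : ((s.erase a).erase (f a)).card + 1 = (s.erase a).card :=
        Finset.card_erase_add_one hfa'
      have hc2 : (s.erase a).card + 1 = s.card := Finset.card_erase_add_one ha
      obtain ⟨m, hm⟩ := heven
      exact ⟨m + 1, by omega⟩

lemma pvDivisors_parity (m : Nat) (hm : 0 < m) :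
    m.divisors.card % 2 = 1 ↔ Nat.sqrt m * Nat.sqrt m = m := by
  by_cases h : Nat.sqrt m * Nat.sqrt m = m
  · simp only [h, iff_true]
    set r := Nat.sqrt m with hr
    have hr0 : 0 < r := by
      rcases Nat.eq_zero_or_pos r with h0 | h0
      · rw [h0] at h; omega
      · exact h0
    have hrmem : r ∈ m.divisors := Nat.mem_divisors.2 ⟨⟨r, h.symm⟩, by omega⟩
    have hdivr : m / r = r := by rw [← h]; exact Nat.mul_div_cancel_left r hr0
    have heven : Even ((m.divisors.erase r)).card := by
      refine pvEven_card_invol (fun d => m / d) _ ?_ ?_ ?_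
      · intro b hb
        rw [Finset.mem_erase] at hb ⊢
        obtain ⟨hbr, hbs⟩ := hb
        have hbd := (Nat.mem_divisors.1 hbs).1
        refine ⟨?_, Nat.mem_divisors.2 ⟨Nat.div_dvd_of_dvd hbd, by omega⟩⟩
        intro hdb
        have hdb2 : m / b = r := hdb
        exact hbr (by rw [← Nat.div_div_self hbd (by omega), hdb2, hdivr])
      · intro b hb
        rw [Finset.mem_erase] at hb
        exact Nat.div_div_self (Nat.mem_divisors.1 hb.2).1 (by omega)
      · intro b hb
        rw [Finset.mem_erase] at hb
        obtain ⟨hbr, hbs⟩ := hb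
        intro hdb
        have hdb2 : m / b = b := hdb
        have hbd := (Nat.mem_divisors.1 hbs).1
        have : m = b * b := Nat.eq_mul_of_div_eq_right hbd hdb2
        exact hbr (Nat.mul_self_inj.1 (by rw [← this, h]))
      
    have hc : (m.divisors.erase r).card + 1 = m.divisors.card :=
      Finset.card_erase_add_one hrmem
    obtain ⟨q, hq⟩ := heven
    omega
  · simp only [h, iff_false]
    have heven : Even m.divisors.card := by
      refine pvEven_card_invol (fun d => m / d) _ ?_ ?_ ?_
      · intro b hb
        have hbd := (Nat.mem_divisors.1 hb).1
        exact Nat.mem_divisors.2 ⟨Nat.div_dvd_of_dvd hbd, by omega⟩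
      · intro b hb
        exact Nat.div_div_self (Nat.mem_divisors.1 hb).1 (by omega)
      · intro b hb hdb
        have hdb2 : m / b = b := hdb
        have hbd := (Nat.mem_divisors.1 hb).1
        have hmb : m = b * b := Nat.eq_mul_of_div_eq_right hbd hdb2
        exact h (by rw [hmb, Nat.sqrt_eq])
    obtain ⟨q, hq⟩ := heven
    omega

lemma pvSum_ind (l : List Nat) (q : Nat → Prop) [DecidablePred q] :
    ((l.map (fun i => if q i then 1 else 0)).sum : Nat) = l.countP (fun i => decide (q i)) := by
  induction l with
  | nil => simp
  | cons x l ih =>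
    rw [List.map_cons, List.sum_cons, ih, List.countP_cons]
    by_cases hx : q x
    · simp [hx]
      omega
    · simp [hx]

lemma pvFilter_card (n : Nat) (q : Nat → Prop) [DecidablePred q] :
    ((Finset.range n).filter q).card = (List.range n).countP (fun i => decide (q i)) := by
  induction n with
  | zero => simp
  | succ n ih =>
    rw [Finset.range_add_one, List.range_succ, List.countP_append, Finset.filter_insert]
    by_cases hq : q n
    · rw [if_pos hq, Finset.card_insert_of_notMem (by simp [Finset.mem_filter])]
      simp [ih, hq]
    · rw [if_neg hq]
      simp [ih, hq]

lemma pvSum_count (n p : Nat) (hp : p < n) :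
    ((List.range n).map (fun i => (pvInner i n).count p)).sum = (p + 1).divisors.card := by
  rw [List.map_congr_left (fun i _ => pvCount_inner i n p hp)]
  rw [pvSum_ind (q := fun i => (i + 1) ∣ (p + 1)), ← pvFilter_card]
  refine Finset.card_bij' (fun a _ => a + 1) (fun d _ => d - 1) ?_ ?_ ?_ ?_
  · intro a ha
    rw [Finset.mem_filter, Finset.mem_range] at ha
    exact Nat.mem_divisors.2 ⟨ha.2, by omega⟩
  · intro d hd
    have hdvd := (Nat.mem_divisors.1 hd).1
    have hd1 : 1 ≤ d := Nat.pos_of_mem_divisors hd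
    have hdle : d ≤ p + 1 := Nat.le_of_dvd (by omega) hdvd
    simp only [Finset.mem_filter, Finset.mem_range]
    have h9 : d - 1 + 1 = d := by omega
    rw [h9]
    exact ⟨by omega, hdvd⟩
  · intro a _
    show a + 1 - 1 = a
    omega
  · intro d hd
    have := Nat.pos_of_mem_divisors hd
    show d - 1 + 1 = d
    omega

def pvSpecF (p : Nat) : String :=
  if Nat.sqrt (p + 1) * Nat.sqrt (p + 1) = p + 1 then "1" else "0"

lemma pvB_fold (m : Nat) :
    (List.range m).foldl
        (fun (st : List String × Int) (j : Nat) =>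
          if (j : Int) + 1 = st.2 * st.2 then (st.1 ++ ["1"], st.2 + 1)
          else (st.1 ++ ["0"], st.2))
        ([], 1)
      = ((List.range m).map pvSpecF, (Nat.sqrt m : Int) + 1) := by
  induction m with
  | zero => simp
  | succ m ih =>
    rw [List.range_succ, List.foldl_append, ih, List.map_append]
    set s := Nat.sqrt m with hs
    have hle : s * s ≤ m := by have h := Nat.sqrt_le' m; simpa [pow_two] using h
    have hlt : m < (s + 1) * (s + 1) := by
      have h := Nat.lt_succ_sqrt' m
      simpa [pow_two, Nat.succ_eq_add_one] using h
    simp only [List.foldl_cons, List.foldl_nil]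
    by_cases hc : m + 1 = (s + 1) * (s + 1)
    · have hcond : (m : Int) + 1 = ((s : Int) + 1) * ((s : Int) + 1) := by exact_mod_cast hc
      rw [if_pos hcond]
      have hsq : Nat.sqrt (m + 1) = s + 1 := by rw [hc]; exact Nat.sqrt_eq (s + 1)
      have hspec : pvSpecF m = "1" := by
        unfold pvSpecF
        rw [if_pos (by rw [hsq, ← hc])]
      simp only [List.map_cons, List.map_nil, hspec]
      refine Prod.ext rfl ?_
      show (s : Int) + 1 + 1 = ((Nat.sqrt (m + 1) : Int)) + 1
      rw [hsq]; push_cast; ring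
    · have hcond : ¬ ((m : Int) + 1 = ((s : Int) + 1) * ((s : Int) + 1)) := by
        intro h; exact hc (by exact_mod_cast h)
      rw [if_neg hcond]
      have hsq : Nat.sqrt (m + 1) = s := by
        have h1 : m + 1 < (s + 1) * (s + 1) := lt_of_le_of_ne (by omega) hc
        have h2 : s * s ≤ m + 1 := by omega
        exact le_antisymm (Nat.lt_succ_iff.1 (Nat.sqrt_lt.2 h1)) (Nat.le_sqrt.2 h2)
      have hspec : pvSpecF m = "0" := by
        unfold pvSpecF
        rw [if_neg (by rw [hsq]; omega)]
      simp only [List.map_cons, List.map_nil, hspec]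
      refine Prod.ext rfl ?_
      show (s : Int) + 1 = ((Nat.sqrt (m + 1) : Int)) + 1
      rw [hsq]

lemma pvInnerInt_fold (i n : Nat) (hin : i < n) (ds : List String) :
    (PySem.List.pyRange (i : Int) (n : Int) ((i : Int) + 1)).foldl
        (fun ds j =>
          if PySem.List.pyGetD ds j "" = "1" then PySem.List.pySetD ds j "0"
          else PySem.List.pySetD ds j "1") ds
      = (pvInner i n).foldl pvTog ds := by
  rw [PySem.List.pyRange_of_pos _ _ (by omega)]
  have hnum : (n : Int) - (i : Int) + ((i : Int) + 1) - 1 = (n : Int) := by ring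
  rw [hnum, if_pos (by exact_mod_cast hin)]
  have hM : (((n : Int) / ((i : Int) + 1)).toNat) = n / (i + 1) := by
    have h1 : ((i : Int) + 1) = ((i + 1 : Nat) : Int) := by push_cast; ring
    rw [h1, ← Int.natCast_div, Int.toNat_natCast]
  rw [hM, List.foldl_map]
  unfold pvInner
  rw [List.foldl_map]
  apply PySem.List.foldl_congr_mem
  intro acc t _
  have hcast : ((i : Int) + ((i : Int) + 1) * (t : Int)) = ((i + (i + 1) * t : Nat) : Int) := by
    push_cast; ring
  rw [hcast, PySem.List.pyGetD_of_nonneg _ _ (by omega), Int.toNat_natCast,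
    PySem.List.pySetD_of_nonneg _ _ (by omega), PySem.List.pySetD_of_nonneg _ _ (by omega),
    Int.toNat_natCast]
  rfl

lemma pvA_eq (k : Int) :
    Keymaker k = PySem.Str.join "" ((List.range k.toNat).map pvSpecF) := by
  unfold Keymaker
  rw [PySem.List.pyRange_one]
  simp only [zero_add, Int.sub_zero]
  rw [List.foldl_map, List.map_map]
  have hdoors0 : (List.range k.toNat).map ((fun _ => "0") ∘ (fun (t : Nat) => (t : Int)))
      = (List.range k.toNat).map (fun p => pvSgn ((fun _ => 0) p)) := rfl
  rw [hdoors0]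
  have houter : (List.range k.toNat).foldl
      (fun doors (t : Nat) =>
        (PySem.List.pyRange (t : Int) k ((t : Int) + 1)).foldl
          (fun ds j =>
            if PySem.List.pyGetD ds j "" = "1" then PySem.List.pySetD ds j "0"
            else PySem.List.pySetD ds j "1") doors)
      ((List.range k.toNat).map (fun p => pvSgn ((fun _ => 0) p)))
      = (List.range k.toNat).foldl (fun ds i => (pvInner i k.toNat).foldl pvTog ds)
          ((List.range k.toNat).map (fun p => pvSgn ((fun _ => 0) p))) := by
    apply PySem.List.foldl_congr_mem
    intro acc i hi
    rw [List.mem_range] at hi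
    have hk : k = (k.toNat : Int) := by omega
    rw [hk]
    exact pvInnerInt_fold i k.toNat hi acc
  rw [houter, pvOuter_fold]
  congr 1
  apply List.map_congr_left
  intro p hp
  rw [List.mem_range] at hp
  rw [pvSum_count k.toNat p hp]
  unfold pvSgn pvSpecF
  simp only [Nat.zero_add]
  by_cases hsq : Nat.sqrt (p + 1) * Nat.sqrt (p + 1) = p + 1
  · rw [if_pos ((pvDivisors_parity (p + 1) (by omega)).2 hsq), if_pos hsq]
  · rw [if_neg (fun h => hsq ((pvDivisors_parity (p + 1) (by omega)).1 h)), if_neg hsq]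

lemma pvB_eq (k : Int) :
    Keymaker_alt k = PySem.Str.join "" ((List.range k.toNat).map pvSpecF) := by
  unfold Keymaker_alt
  rw [PySem.List.pyRange_one]
  simp only [zero_add, Int.sub_zero]
  rw [List.foldl_map]
  have hfold : (List.range k.toNat).foldl
      (fun (st : List String × Int) (t : Nat) =>
        if (t : Int) + 1 = st.2 * st.2 then (st.1 ++ ["1"], st.2 + 1) else (st.1 ++ ["0"], st.2))
      ([], 1)
      = ((List.range k.toNat).map pvSpecF, (Nat.sqrt k.toNat : Int) + 1) := pvB_fold k.toNat
  rw [hfold]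

-- ===== VERDICT (by name: the statement is the Claim_ definition above) =====
theorem Keymaker_spec : Claim_equal_Keymaker := by
  intro k _
  unfold Spec_Keymaker
  rw [pvA_eq, pvB_eq]
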